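-- pv_equiv track=rewrite | github.com/hyunlord/worldsim-training | training/lib/qlora_smoke.py | _strip_labeled_sections
-- ===== SOURCE A (Python) =====
-- def _strip_labeled_sections(content: str, labels: set[str]) -> str:
--     lines = content.splitlines()
--     kept: list[str] = []
--     skip = False
--
--     for line in lines:
--         stripped = line.strip()
--         if stripped.startswith("[") and stripped.endswith("]") and len(stripped) > 2:
--             label = stripped[1:-1].strip()
--             skip = label in labels
--             if skip:
--                 continue
--         if not skip:
--             kept.append(line)
--
--     return "\n".join(kept).strip()
-- ===== SOURCE B (Python) =====
-- def _strip_labeled_sections(content: str, labels: set[str]) -> str: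
--     def _header_label(line):
--         s = line.strip()
--         if s.startswith("[") and s.endswith("]") and len(s) > 2:
--             return s[1:-1].strip()
--         return None
--
--     # pass 1: partition into a preamble block plus one block per header line
--     blocks = [(None, [])]
--     for line in content.splitlines():
--         lab = _header_label(line)
--         if lab is None:
--             blocks[-1][1].append(line)
--         else:
--             blocks.append((lab, [line]))
--
--     # pass 2: keep the preamble and every block whose label is not filtered
--     kept = []
--     for lab, body in blocks:
--         if lab is None or lab not in labels:
--             kept.extend(body)
--     return "\n".join(kept).strip()
-- ===== Notes on version B (the rewrite author's own statement) =====
-- stated objective: alternative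
-- what changed: Replaces A's single stateful scan with a skip flag by a two-pass block decomposition: first partition the lines into a preamble block plus one block per header line, then keep whole blocks whose label is not filtered and flatten.
import Mathlib
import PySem

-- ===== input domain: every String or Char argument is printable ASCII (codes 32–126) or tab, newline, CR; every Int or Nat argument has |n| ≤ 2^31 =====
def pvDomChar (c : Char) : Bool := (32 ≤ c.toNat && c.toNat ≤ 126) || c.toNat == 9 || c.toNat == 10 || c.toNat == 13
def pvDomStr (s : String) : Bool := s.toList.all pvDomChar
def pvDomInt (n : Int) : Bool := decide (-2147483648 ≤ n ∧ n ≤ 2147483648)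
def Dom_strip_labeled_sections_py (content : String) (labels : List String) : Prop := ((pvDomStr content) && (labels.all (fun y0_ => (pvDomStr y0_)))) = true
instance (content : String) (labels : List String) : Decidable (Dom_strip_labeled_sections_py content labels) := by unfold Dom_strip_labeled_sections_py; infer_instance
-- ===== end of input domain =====

-- B replaces A's single stateful scan (skip flag) by a two-pass block decomposition:
-- partition lines into header-labelled blocks, then keep whole blocks and flatten. Same cost.

-- ===== PORT A =====
-- one iteration of A's loop over (kept, skip)
def pvStepA (labels : List String) (st : List String × Bool) (line : String) : List String × Bool :=
  let stripped := PySem.Str.strip line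
  if PySem.Str.startswith stripped "[" && PySem.Str.endswith stripped "]" && decide (2 < PySem.Str.len stripped) then
    let label := PySem.Str.strip (PySem.Str.slice stripped (some 1) (some (-1)))
    let skip := PySem.Set.contains labels label
    if skip then (st.1, skip)
    else (st.1 ++ [line], skip)   -- skip is False here, so the 'if not skip' append fires
  else
    if !st.2 then (st.1 ++ [line], st.2) else st

def strip_labeled_sections_py (content : String) (labels : List String) : String :=
  let lines := PySem.Str.splitlines content
  let r := lines.foldl (pvStepA labels) ([], false)
  PySem.Str.strip (PySem.Str.join "\n" r.1)

-- ===== PORT B =====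
-- the inner label of a header line, none if the line is not a header
def pvHeaderLabel (line : String) : Option String :=
  let s := PySem.Str.strip line
  if PySem.Str.startswith s "[" && PySem.Str.endswith s "]" && decide (2 < PySem.Str.len s) then
    some (PySem.Str.strip (PySem.Str.slice s (some 1) (some (-1))))
  else none

-- blocks[-1][1].append(line)
def pvAppendLast (bs : List (Option String × List String)) (l : String) : List (Option String × List String) :=
  match bs with
  | [] => []
  | [b] => [(b.1, b.2 ++ [l])]
  | b :: rest => b :: pvAppendLast rest l

-- one iteration of B's first pass
def pvStepB (bs : List (Option String × List String)) (line : String) : List (Option String × List String) :=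
  match pvHeaderLabel line with
  | none => pvAppendLast bs line
  | some lab => bs ++ [(some lab, [line])]

def strip_labeled_sections_py_alt (content : String) (labels : List String) : String :=
  let blocks := (PySem.Str.splitlines content).foldl pvStepB [(none, [])]
  let kept := blocks.foldl (fun kept b =>
    match b.1 with
    | none => kept ++ b.2
    | some lab => if PySem.Set.contains labels lab then kept else kept ++ b.2) []
  PySem.Str.strip (PySem.Str.join "\n" kept)

-- ===== PRECONDITION & SPEC =====
def Spec_strip_labeled_sections_py (content : String) (labels : List String) (out : String) : Prop := out = strip_labeled_sections_py_alt content labels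
instance (content : String) (labels : List String) (out : String) : Decidable (Spec_strip_labeled_sections_py content labels out) := by unfold Spec_strip_labeled_sections_py; infer_instance

-- ===== CLAIM (what is proved, stated in full; the proofs are below) =====
def Claim_equal_strip_labeled_sections_py : Prop := ∀ (content : String) (labels : List String), Dom_strip_labeled_sections_py content labels → Spec_strip_labeled_sections_py content labels (strip_labeled_sections_py content labels)

-- ===== LEMMAS AND PROOFS =====

-- whether a block with this (optional) label is kept
def pvKeepO (labels : List String) : Option String → Bool
  | none => true
  | some lab => !PySem.Set.contains labels lab

-- the common reference result: the lines kept from `lines` starting in skip-state `skip`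
def pvG (labels : List String) : List String → Bool → List String
  | [], _ => []
  | l :: rest, skip =>
    match pvHeaderLabel l with
    | some lab => if PySem.Set.contains labels lab then pvG labels rest true else l :: pvG labels rest false
    | none => if skip then pvG labels rest skip else l :: pvG labels rest skip

-- A's loop computes pvG
theorem pvA_loop (labels : List String) (lines : List String) :
    ∀ (kept : List String) (skip : Bool),
      (lines.foldl (pvStepA labels) (kept, skip)).1 = kept ++ pvG labels lines skip := by
  induction lines with
  | nil => intro kept skip; simp [pvG]
  | cons l rest ih =>
    intro kept skip
    simp only [List.foldl_cons, pvG, pvStepA, pvHeaderLabel]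
    split
    · split
      · simp_all
      · simp_all
    · cases skip <;> simp_all

-- pvStepB only touches the last block
theorem pvAppendLast_append (xs : List (Option String × List String)) (b : Option String × List String) (l : String) :
    pvAppendLast (xs ++ [b]) l = xs ++ [(b.1, b.2 ++ [l])] := by
  induction xs with
  | nil => simp [pvAppendLast]
  | cons x xs ih =>
    cases xs with
    | nil => simp [pvAppendLast]
    | cons y ys => simpa [pvAppendLast] using ih

theorem pvStepB_append (xs bs : List (Option String × List String)) (l : String) (h : bs ≠ []) :
    pvStepB (xs ++ bs) l = xs ++ pvStepB bs l := by
  unfold pvStepB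
  cases pvHeaderLabel l with
  | none =>
    rcases List.eq_nil_or_concat bs with rfl | ⟨ys, b, rfl⟩
    · exact absurd rfl h
    · simp [← List.append_assoc, pvAppendLast_append]
  | some lab => simp

theorem pvStepB_ne_nil (bs : List (Option String × List String)) (l : String) (h : bs ≠ []) :
    pvStepB bs l ≠ [] := by
  unfold pvStepB
  cases pvHeaderLabel l with
  | none =>
    rcases List.eq_nil_or_concat bs with rfl | ⟨ys, b, rfl⟩
    · exact absurd rfl h
    · simp [pvAppendLast_append]
  | some lab => simp

theorem pvFoldB_append (lines : List String) :
    ∀ (xs bs : List (Option String × List String)), bs ≠ [] →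
      lines.foldl pvStepB (xs ++ bs) = xs ++ lines.foldl pvStepB bs := by
  induction lines with
  | nil => intro xs bs _; simp
  | cons l rest ih =>
    intro xs bs h
    simp only [List.foldl_cons, pvStepB_append xs bs l h]
    exact ih xs _ (pvStepB_ne_nil bs l h)

-- the flattened kept lines of a block list
def pvFlatK (labels : List String) (bs : List (Option String × List String)) : List String :=
  bs.flatMap (fun b => if pvKeepO labels b.1 then b.2 else [])

theorem pvKept_loop (labels : List String) (bs : List (Option String × List String)) :
    ∀ (acc : List String),
      bs.foldl (fun kept b =>
        match b.1 with
        | none => kept ++ b.2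
        | some lab => if PySem.Set.contains labels lab then kept else kept ++ b.2) acc
      = acc ++ pvFlatK labels bs := by
  induction bs with
  | nil => intro acc; simp [pvFlatK]
  | cons b rest ih =>
    intro acc
    simp only [List.foldl_cons, ih, pvFlatK, List.flatMap_cons]
    cases hb : b.1 with
    | none => simp [pvKeepO]
    | some lab => by_cases h : lab ∈ labels <;> simp [pvKeepO, h]

-- B's first pass followed by flattening computes pvG
theorem pvB_main (labels : List String) (lines : List String) :
    ∀ (lab : Option String) (body : List String),
      pvFlatK labels (lines.foldl pvStepB [(lab, body)])
      = (if pvKeepO labels lab then body else []) ++ pvG labels lines (!pvKeepO labels lab) := by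
  induction lines with
  | nil => intro lab body; simp [pvFlatK, pvG]
  | cons l rest ih =>
    intro lab body
    simp only [List.foldl_cons, pvG]
    cases hl : pvHeaderLabel l with
    | none =>
      have hstep : pvStepB [(lab, body)] l = [(lab, body ++ [l])] := by
        simp [pvStepB, hl, pvAppendLast]
      rw [hstep, ih]
      cases hk : pvKeepO labels lab <;> simp
    | some lb =>
      have hstep : pvStepB [(lab, body)] l = [(lab, body)] ++ [(some lb, [l])] := by
        simp [pvStepB, hl]
      rw [hstep, pvFoldB_append rest [(lab, body)] [(some lb, [l])] (by simp)]
      simp only [pvFlatK, List.flatMap_append, List.flatMap_cons, List.flatMap_nil]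
      have := ih (some lb) [l]
      simp only [pvFlatK] at this
      rw [this]
      by_cases h : lb ∈ labels <;> simp [pvKeepO, h]

-- ===== VERDICT (by name: the statement is the Claim_ definition above) =====
theorem strip_labeled_sections_py_spec : Claim_equal_strip_labeled_sections_py := by
  intro content labels _
  unfold Spec_strip_labeled_sections_py strip_labeled_sections_py strip_labeled_sections_py_alt
  simp only [pvA_loop labels _ [] false, pvKept_loop labels _ [], List.nil_append]
  rw [pvB_main labels _ none []]
  simp [pvKeepO]
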